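-- pv_equiv track=rewrite | github.com/pemodest0/Assyntrax | scripts/bench/run_motor_470_diagnostics.py | _apply_hysteresis
-- ===== SOURCE A (Python) =====
-- def _apply_hysteresis(labels: list[str], min_persist: int) -> list[str]:
--     if not labels:
--         return []
--     k = int(max(1, min_persist))
--     current = labels[0]
--     pending = ""
--     cnt = 0
--     out = [current]
--     for raw in labels[1:]:
--         if raw == current:
--             pending = ""
--             cnt = 0
--             out.append(current)
--             continue
--         if raw == pending:
--             cnt += 1
--         else:
--             pending = raw
--             cnt = 1
--         if cnt >= k:
--             current = pending
--             pending = ""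
--             cnt = 0
--         out.append(current)
--     return out
-- ===== SOURCE B (Python) =====
-- def _apply_hysteresis(labels: list[str], min_persist: int) -> list[str]:
--     if not labels:
--         return []
--     k = int(max(1, min_persist))
--     # compress labels into maximal runs of equal values
--     runs = []
--     rv, rl = labels[0], 1
--     for v in labels[1:]:
--         if v == rv:
--             rl += 1
--         else:
--             runs.append((rv, rl))
--             rv, rl = v, 1
--     runs.append((rv, rl))
--     # emit run by run
--     out = []
--     current = labels[0]
--     for v, L in runs:
--         if v == current:
--             out.extend([current] * L)
--         elif L >= k:
--             out.extend([current] * (k - 1))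
--             current = v
--             out.extend([current] * (L - (k - 1)))
--         else:
--             out.extend([current] * L)
--     return out
-- ===== Notes on version B (the rewrite author's own statement) =====
-- stated objective: alternative
-- what changed: B first compresses the labels into maximal (value, length) runs in one pass, then emits the smoothed output run by run with replicate-style extends, instead of A's element-wise loop carrying a pending/counter state.
import Mathlib
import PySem

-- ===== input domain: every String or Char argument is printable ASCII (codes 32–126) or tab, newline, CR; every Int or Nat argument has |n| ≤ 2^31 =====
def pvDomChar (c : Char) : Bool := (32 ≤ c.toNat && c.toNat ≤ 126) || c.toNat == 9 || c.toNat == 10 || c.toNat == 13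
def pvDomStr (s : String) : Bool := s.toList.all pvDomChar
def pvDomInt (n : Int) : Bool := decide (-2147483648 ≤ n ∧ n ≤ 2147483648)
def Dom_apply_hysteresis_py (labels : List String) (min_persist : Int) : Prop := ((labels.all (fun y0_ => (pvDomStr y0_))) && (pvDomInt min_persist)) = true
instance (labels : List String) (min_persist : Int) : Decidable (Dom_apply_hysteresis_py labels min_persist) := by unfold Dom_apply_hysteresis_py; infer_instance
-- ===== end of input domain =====

-- B replaces A's element-wise pending/counter loop by run-length compression followed by
-- run-by-run emission (alternative decomposition, same cost); return values agree everywhere.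

-- ===== PORT A =====
-- A's loop over labels[1:]: state (current, pending, cnt); one output element per input element.
def pvLoopA (k : Int) (current pending : String) (cnt : Int) : List String → List String
  | [] => []
  | raw :: rest =>
    if raw = current then current :: pvLoopA k current "" 0 rest
    else
      let pending' := if raw = pending then pending else raw
      let cnt' := if raw = pending then cnt + 1 else 1
      if cnt' ≥ k then pending' :: pvLoopA k pending' "" 0 rest
      else current :: pvLoopA k current pending' cnt' rest

def apply_hysteresis_py (labels : List String) (min_persist : Int) : List String :=
  match labels with
  | [] => []
  | l0 :: rest =>
    let k : Int := max 1 min_persist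
    l0 :: pvLoopA k l0 "" 0 rest

-- ===== PORT B =====
-- run-length compression of Source B's first loop (state: current run value rv and length rl)
def pvRunsAux (v : String) (n : Nat) : List String → List (String × Nat)
  | [] => [(v, n)]
  | y :: ys => if y = v then pvRunsAux v (n + 1) ys else (v, n) :: pvRunsAux y 1 ys

-- Source B's second loop: emit each run, switching `current` inside a long enough differing run
def pvEmit (k : Nat) (current : String) : List (String × Nat) → List String
  | [] => []
  | (v, L) :: rest =>
    if v = current then List.replicate L current ++ pvEmit k current rest
    else if L ≥ k then
      List.replicate (k - 1) current ++ List.replicate (L - (k - 1)) v ++ pvEmit k v rest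
    else List.replicate L current ++ pvEmit k current rest

def apply_hysteresis_py_alt (labels : List String) (min_persist : Int) : List String :=
  match labels with
  | [] => []
  | l0 :: rest =>
    let k : Int := max 1 min_persist
    pvEmit k.toNat l0 (pvRunsAux l0 1 rest)

-- ===== PRECONDITION & SPEC =====
def Spec_apply_hysteresis_py (labels : List String) (min_persist : Int) (out : List String) : Prop := out = apply_hysteresis_py_alt labels min_persist
instance (labels : List String) (min_persist : Int) (out : List String) : Decidable (Spec_apply_hysteresis_py labels min_persist out) := by unfold Spec_apply_hysteresis_py; infer_instance

-- ===== CLAIM (what is proved, stated in full; the proofs are below) =====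
def Claim_equal_apply_hysteresis_py : Prop := ∀ (labels : List String) (min_persist : Int), Dom_apply_hysteresis_py labels min_persist → Spec_apply_hysteresis_py labels min_persist (apply_hysteresis_py labels min_persist)

-- ===== LEMMAS AND PROOFS =====

-- A's loop state after having processed n ≥ 1 copies of v since the last run boundary,
-- where `cur` was the current label at that boundary.
def pvMidSt (kN : Nat) (cur v : String) (n : Nat) : String × String × Int :=
  if v = cur then (cur, "", 0)
  else if n < kN then (cur, v, (n : Int))
  else (v, "", 0)

-- the output A produced for those n elements
def pvMidEmit (kN : Nat) (cur v : String) (n : Nat) : List String :=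
  if v = cur then List.replicate n cur
  else if n < kN then List.replicate n cur
  else List.replicate (kN - 1) cur ++ List.replicate (n - (kN - 1)) v

-- one step of A's loop from a fresh state (pending = "", cnt = 0) on raw ≠ current
theorem pvLoopA_stepFresh (k : Int) (cur raw : String) (rest : List String) (h : raw ≠ cur) :
    pvLoopA k cur "" 0 (raw :: rest) =
      if 1 ≥ k then raw :: pvLoopA k raw "" 0 rest else cur :: pvLoopA k cur raw 1 rest := by
  by_cases hb : raw = ""
  · subst hb; simp [pvLoopA, h]
  · simp [pvLoopA, h, hb]

theorem pvMidSt_self (kN : Nat) (cur : String) (n : Nat) : pvMidSt kN cur cur n = (cur, "", 0) := by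
  simp [pvMidSt]

theorem pvMidEmit_self (kN : Nat) (cur : String) (n : Nat) : pvMidEmit kN cur cur n = List.replicate n cur := by
  simp [pvMidEmit]

theorem pvMain (kN : Nat) (hk : 1 ≤ kN) :
    ∀ (t : List String) (v cur : String) (n : Nat), 1 ≤ n →
      pvEmit kN cur (pvRunsAux v n t) =
        pvMidEmit kN cur v n ++
          pvLoopA (kN : Int) (pvMidSt kN cur v n).1 (pvMidSt kN cur v n).2.1
            (pvMidSt kN cur v n).2.2 t := by
  intro t
  induction t with
  | nil =>
    intro v cur n hn
    by_cases hvc : v = cur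
    · simp [pvRunsAux, pvEmit, pvMidEmit, hvc, pvLoopA]
    · by_cases hlt : n < kN
      · simp [pvRunsAux, pvEmit, pvMidEmit, hvc, hlt, pvLoopA, Nat.not_le.mpr hlt]
      · simp [pvRunsAux, pvEmit, pvMidEmit, hvc, hlt, pvLoopA, Nat.le_of_not_lt hlt]
  | cons y ys ih =>
    intro v cur n hn
    by_cases hyv : y = v
    · -- the run continues
      subst hyv
      rw [show pvRunsAux y n (y :: ys) = pvRunsAux y (n + 1) ys by simp [pvRunsAux]]
      rw [ih y cur (n + 1) (by omega)]
      by_cases hvc : y = cur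
      · subst hvc
        simp [pvMidSt, pvMidEmit, pvLoopA, List.replicate_succ']
      · by_cases hlt : n < kN
        · by_cases hlt2 : n + 1 < kN
          · -- no switch yet
            have hx : ¬ ((n : Int) + 1 ≥ (kN : Int)) := by omega
            simp [pvMidSt, pvMidEmit, hvc, hlt, hlt2, pvLoopA, hx, List.replicate_succ']
          · -- switch happens now: n = kN - 1
            have hge : ((n : Int) + 1 ≥ (kN : Int)) := by omega
            have h2 : n + 1 - (kN - 1) = 1 := by omega
            have h3 : kN - 1 = n := by omega
            simp [pvMidSt, pvMidEmit, hvc, hlt, hlt2, pvLoopA, hge, h3]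
        · -- already switched; rest of run just re-emits y
          have hlt2 : ¬ n + 1 < kN := by omega
          have h2 : n + 1 - (kN - 1) = (n - (kN - 1)) + 1 := by omega
          simp [pvMidSt, pvMidEmit, hvc, hlt, hlt2, pvLoopA, h2, List.replicate_succ']
    · -- a new run starts at y
      rw [show pvRunsAux v n (y :: ys) = (v, n) :: pvRunsAux y 1 ys by simp [pvRunsAux, hyv]]
      by_cases hvc : v = cur
      · -- finished run was a current-run: state fresh, current unchanged
        subst hvc
        rw [show pvEmit kN v ((v, n) :: pvRunsAux y 1 ys)
              = List.replicate n v ++ pvEmit kN v (pvRunsAux y 1 ys) by simp [pvEmit]]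
        rw [ih y v 1 le_rfl, pvMidSt_self, pvMidEmit_self]
        rw [pvLoopA_stepFresh _ _ _ _ hyv]
        by_cases h1 : 1 ≥ (kN : Int)
        · have hk1 : kN = 1 := by omega
          simp [hk1, pvMidSt, pvMidEmit, hyv]
        · have hlt1 : 1 < kN := by omega
          simp [h1, pvMidSt, pvMidEmit, hyv, hlt1]
      · by_cases hlt : n < kN
        · -- finished run too short: no switch happened; state was (cur, v, n)
          rw [show pvEmit kN cur ((v, n) :: pvRunsAux y 1 ys)
                = List.replicate n cur ++ pvEmit kN cur (pvRunsAux y 1 ys) by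
              simp [pvEmit, hvc, Nat.not_le.mpr hlt]]
          rw [ih y cur 1 le_rfl]
          rw [show pvMidSt kN cur v n = (cur, v, (n : Int)) by simp [pvMidSt, hvc, hlt],
              show pvMidEmit kN cur v n = List.replicate n cur by simp [pvMidEmit, hvc, hlt]]
          by_cases hyc : y = cur
          · -- raw equals current: fresh reset
            subst hyc
            simp [pvLoopA, pvMidSt_self, pvMidEmit_self]
          · rw [show pvLoopA (kN : Int) cur v (n : Int) (y :: ys)
                = if 1 ≥ (kN : Int) then y :: pvLoopA (kN : Int) y "" 0 ys
                  else cur :: pvLoopA (kN : Int) cur y 1 ys by simp [pvLoopA, hyc, hyv]]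
            by_cases h1 : 1 ≥ (kN : Int)
            · have hk1 : kN = 1 := by omega
              simp [hk1, pvMidSt, pvMidEmit, hyc]
            · have hlt1 : 1 < kN := by omega
              simp [h1, pvMidSt, pvMidEmit, hyc, hlt1]
        · -- finished run switched current to v; state fresh
          rw [show pvEmit kN cur ((v, n) :: pvRunsAux y 1 ys)
                = List.replicate (kN - 1) cur ++ (List.replicate (n - (kN - 1)) v
                    ++ pvEmit kN v (pvRunsAux y 1 ys)) by
              simp [pvEmit, hvc, Nat.le_of_not_lt hlt]]
          rw [ih y v 1 le_rfl]
          rw [show pvMidSt kN cur v n = (v, "", 0) by simp [pvMidSt, hvc, hlt],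
              show pvMidEmit kN cur v n
                = List.replicate (kN - 1) cur ++ List.replicate (n - (kN - 1)) v by
              simp [pvMidEmit, hvc, hlt]]
          rw [pvLoopA_stepFresh _ _ _ _ hyv]
          by_cases h1 : 1 ≥ (kN : Int)
          · have hk1 : kN = 1 := by omega
            simp [hk1, pvMidSt, pvMidEmit, hyv]
          · have hlt1 : 1 < kN := by omega
            simp [h1, pvMidSt, pvMidEmit, hyv, hlt1]

-- ===== VERDICT (by name: the statement is the Claim_ definition above) =====
theorem apply_hysteresis_py_spec : Claim_equal_apply_hysteresis_py := by
  intro labels min_persist _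
  unfold Spec_apply_hysteresis_py
  cases labels with
  | nil => rfl
  | cons l0 rest =>
    simp only [apply_hysteresis_py, apply_hysteresis_py_alt]
    set k : Int := max 1 min_persist with hkdef
    have hk1 : 1 ≤ k := le_max_left _ _
    have hcast : ((k.toNat : Nat) : Int) = k := Int.toNat_of_nonneg (by omega)
    have hkN : 1 ≤ k.toNat := by omega
    rw [pvMain k.toNat hkN rest l0 l0 1 le_rfl]
    simp [pvMidSt, pvMidEmit, hcast]
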